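-- pv_equiv track=rewrite | github.com/HeavenSleep/qbit2track | qbit2track/trackers/lacale.py | _find_matching_tag_id
-- ===== SOURCE A (Python) =====
-- from typing import Dict, List, Optional, Any
--
-- def _find_matching_tag_id(tag_value: str, available_tags: Dict[str, str]) -> Optional[str]:
--     """Find the best matching tag ID for a given value"""
--     # Direct match
--     for tag_id, tag_name in available_tags.items():
--         if tag_name.lower() == tag_value.lower():
--             return tag_id
--
--     # Partial match
--     for tag_id, tag_name in available_tags.items():
--         if tag_value.lower() in tag_name.lower() or tag_name.lower() in tag_value.lower():
--             return tag_id
--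
--     return None
-- ===== SOURCE B (Python) =====
-- def _find_matching_tag_id(tag_value, available_tags):
--     """Single pass: return exact match immediately, remember first partial candidate."""
--     tv = tag_value.lower()
--     candidate = None
--     for tag_id, tag_name in available_tags.items():
--         tn = tag_name.lower()
--         if tn == tv:
--             return tag_id
--         if candidate is None and (tv in tn or tn in tv):
--             candidate = tag_id
--     return candidate
-- ===== Notes on version B (the rewrite author's own statement) =====
-- stated objective: faster
-- what changed: Replaces A's two full passes over the dict (exact pass, then partial pass) by one single pass that returns on an exact match and remembers the first partial candidate, lowering tag_value once instead of per comparison.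
import Mathlib
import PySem

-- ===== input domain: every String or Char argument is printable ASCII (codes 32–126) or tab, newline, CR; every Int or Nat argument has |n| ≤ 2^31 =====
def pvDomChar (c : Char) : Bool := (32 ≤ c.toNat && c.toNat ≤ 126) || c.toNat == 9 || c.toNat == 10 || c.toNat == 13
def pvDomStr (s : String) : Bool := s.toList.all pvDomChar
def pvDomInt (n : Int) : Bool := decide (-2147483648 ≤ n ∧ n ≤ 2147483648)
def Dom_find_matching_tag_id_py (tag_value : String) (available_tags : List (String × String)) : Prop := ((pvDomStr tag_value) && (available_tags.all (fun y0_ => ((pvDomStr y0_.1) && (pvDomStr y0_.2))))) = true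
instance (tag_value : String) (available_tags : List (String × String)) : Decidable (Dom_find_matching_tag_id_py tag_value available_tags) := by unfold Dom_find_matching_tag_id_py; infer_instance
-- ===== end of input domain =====

-- B replaces A's two full passes by one pass that returns on an exact match and remembers the first partial candidate (constant-factor speedup); return value only, no mutation.


-- ===== PORT A =====
-- first pass of A: return the first tag whose lowered name equals lowered tag_value
def pvAExact (tag_value : String) : List (String × String) → Option String
  | [] => none
  | (tag_id, tag_name) :: rest =>
    if PySem.Str.lower tag_name == PySem.Str.lower tag_value then some tag_id
    else pvAExact tag_value rest

-- second pass of A: return the first tag with a partial (substring either way) match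
def pvAPartial (tag_value : String) : List (String × String) → Option String
  | [] => none
  | (tag_id, tag_name) :: rest =>
    if PySem.Str.isIn (PySem.Str.lower tag_value) (PySem.Str.lower tag_name)
        || PySem.Str.isIn (PySem.Str.lower tag_name) (PySem.Str.lower tag_value) then some tag_id
    else pvAPartial tag_value rest

def find_matching_tag_id_py (tag_value : String) (available_tags : List (String × String)) : Option String :=
  match pvAExact tag_value available_tags with
  | some tag_id => some tag_id
  | none =>
    match pvAPartial tag_value available_tags with
    | some tag_id => some tag_id
    | none => none

-- ===== PORT B =====
-- B's single loop: tv is the pre-lowered tag_value, candidate the remembered first partial match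
def pvBLoop (tv : String) (candidate : Option String) : List (String × String) → Option String
  | [] => candidate
  | (tag_id, tag_name) :: rest =>
    let tn := PySem.Str.lower tag_name
    if tn == tv then some tag_id
    else
      pvBLoop tv
        (if candidate.isNone && (PySem.Str.isIn tv tn || PySem.Str.isIn tn tv) then some tag_id
         else candidate) rest

def find_matching_tag_id_py_alt (tag_value : String) (available_tags : List (String × String)) : Option String :=
  pvBLoop (PySem.Str.lower tag_value) none available_tags

-- ===== PRECONDITION & SPEC =====
def Spec_find_matching_tag_id_py (tag_value : String) (available_tags : List (String × String)) (out : Option String) : Prop := out = find_matching_tag_id_py_alt tag_value available_tags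
instance (tag_value : String) (available_tags : List (String × String)) (out : Option String) : Decidable (Spec_find_matching_tag_id_py tag_value available_tags out) := by unfold Spec_find_matching_tag_id_py; infer_instance

-- ===== CLAIM (what is proved, stated in full; the proofs are below) =====
def Claim_equal_find_matching_tag_id_py : Prop := ∀ (tag_value : String) (available_tags : List (String × String)), Dom_find_matching_tag_id_py tag_value available_tags → Spec_find_matching_tag_id_py tag_value available_tags (find_matching_tag_id_py tag_value available_tags)

-- ===== LEMMAS AND PROOFS =====
-- B's loop, for any carried candidate, computes: first exact match, else candidate, else first partial match
theorem pvBLoop_eq (tag_value : String) (candidate : Option String)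
    (tags : List (String × String)) :
    pvBLoop (PySem.Str.lower tag_value) candidate tags =
      match pvAExact tag_value tags with
      | some tag_id => some tag_id
      | none =>
        match candidate with
        | some x => some x
        | none => pvAPartial tag_value tags := by
  induction tags generalizing candidate with
  | nil => cases candidate <;> simp [pvBLoop, pvAExact, pvAPartial]
  | cons hd rest ih =>
    obtain ⟨tag_id, tag_name⟩ := hd
    by_cases hex : (PySem.Str.lower tag_name == PySem.Str.lower tag_value) = true
    · simp [pvBLoop, pvAExact, hex]
    · rw [show pvBLoop (PySem.Str.lower tag_value) candidate ((tag_id, tag_name) :: rest) =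
          pvBLoop (PySem.Str.lower tag_value)
            (if candidate.isNone && (PySem.Str.isIn (PySem.Str.lower tag_value) (PySem.Str.lower tag_name)
                || PySem.Str.isIn (PySem.Str.lower tag_name) (PySem.Str.lower tag_value)) then some tag_id
             else candidate) rest from by simp [pvBLoop, hex]]
      rw [ih]
      cases candidate with
      | some x => simp [pvAExact, hex]
      | none =>
        simp only [pvAExact, pvAPartial, hex, if_false, Bool.false_eq_true, Option.isNone_none,
          Bool.true_and]
        split <;> first
          | rfl
          | (split_ifs <;> rfl)

-- ===== VERDICT (by name: the statement is the Claim_ definition above) =====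
theorem find_matching_tag_id_py_spec : Claim_equal_find_matching_tag_id_py := by
  intro tag_value available_tags _
  unfold Spec_find_matching_tag_id_py find_matching_tag_id_py find_matching_tag_id_py_alt
  rw [pvBLoop_eq]
  cases pvAExact tag_value available_tags <;> cases pvAPartial tag_value available_tags <;> simp
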